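-- pv_equiv track=rewrite | github.com/TheAlgorithms/Python | ciphers/columnar_transposition.py | _column_order
-- ===== SOURCE A (Python) =====
-- def _column_order(key: str) -> list[int]:
--     # Stable sort by character then original index to handle duplicates
--     indexed = list(enumerate(key))
--     return [
--         i
--         for i, _ in sorted(
--             indexed, key=lambda indexed_pair: (indexed_pair[1], indexed_pair[0])
--         )
--     ]
-- ===== SOURCE B (Python) =====
-- def _column_order(key: str) -> list[int]:
--     # Group positions by character, then emit groups in sorted character order.
--     positions: dict[str, list[int]] = {}
--     for i, ch in enumerate(key):
--         positions.setdefault(ch, []).append(i)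
--     result: list[int] = []
--     for ch in sorted(positions):
--         result.extend(positions[ch])
--     return result
-- ===== Notes on version B (the rewrite author's own statement) =====
-- stated objective: alternative
-- what changed: Instead of sorting all (index,char) pairs by a tuple key, B builds a char->positions table in one pass and concatenates the position lists over the sorted distinct characters.
import Mathlib
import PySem

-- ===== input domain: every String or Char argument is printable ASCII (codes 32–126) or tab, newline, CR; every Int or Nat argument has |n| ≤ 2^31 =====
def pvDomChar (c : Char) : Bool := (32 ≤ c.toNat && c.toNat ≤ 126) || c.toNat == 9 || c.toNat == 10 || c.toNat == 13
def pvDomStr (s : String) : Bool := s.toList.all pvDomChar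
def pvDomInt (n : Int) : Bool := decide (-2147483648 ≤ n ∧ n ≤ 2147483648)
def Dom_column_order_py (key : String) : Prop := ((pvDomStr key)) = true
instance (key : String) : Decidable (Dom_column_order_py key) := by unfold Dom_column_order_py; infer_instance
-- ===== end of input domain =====

-- B groups the positions of each character in one pass (a dict char -> positions) and concatenates the
-- groups over the sorted distinct characters, instead of A's stable sort of all (index, char) pairs.

-- ===== PORT A =====
-- sorted(enumerate(key), key=lambda p: (p[1], p[0])), then take the indices
def column_order_py (key : String) : List Int :=
  let indexed := PySem.List.enumerate key.toList
  (PySem.List.sorted2 indexed (fun p => p.2) (fun p => p.1) false).map (fun p => p.1)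

-- ===== PORT B =====
-- positions.setdefault(ch, []).append(i) loop, then extend over sorted(positions)
def column_order_py_alt (key : String) : List Int :=
  let positions := (PySem.List.enumerate key.toList).foldl
      (fun d p => d.modify p.2 [] (fun l => l ++ [p.1])) PySem.Dict.empty
  (PySem.List.sorted positions.keys (fun c => c) false).foldl
      (fun acc c => acc ++ positions.getD c []) []

-- ===== PRECONDITION & SPEC =====
def Spec_column_order_py (key : String) (out : List Int) : Prop := out = column_order_py_alt key
instance (key : String) (out : List Int) : Decidable (Spec_column_order_py key out) := by unfold Spec_column_order_py; infer_instance

-- ===== CLAIM (what is proved, stated in full; the proofs are below) =====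
def Claim_equal_column_order_py : Prop := ∀ (key : String), Dom_column_order_py key → Spec_column_order_py key (column_order_py key)

-- ===== LEMMAS AND PROOFS =====

-- A's tuple-key sort is the sort by the lexicographic key
theorem sorted2_eq_sorted_lex {α κ₁ κ₂ : Type} [LinearOrder κ₁] [LinearOrder κ₂]
    (xs : List α) (k1 : α → κ₁) (k2 : α → κ₂) :
    PySem.List.sorted2 xs k1 k2 false
      = PySem.List.sorted xs (fun x => toLex (k1 x, k2 x)) false := by
  simp only [PySem.List.sorted2, PySem.List.sorted, Bool.false_eq_true, if_false]
  congr 1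
  funext acc x
  congr 1
  funext a b
  rcases lt_trichotomy (k1 a) (k1 b) with h | h | h
  · simp [h, Prod.Lex.lt_iff]
  · simp [h, Prod.Lex.lt_iff]
  · simp [h, h.ne', not_lt_of_gt h, Prod.Lex.lt_iff]

-- grouping by a key over a duplicate-free complete list of keys is a permutation
theorem flatMap_filter_perm {α κ : Type} [BEq κ] [LawfulBEq κ] (key : α → κ) :
    ∀ (chars : List κ) (ps : List α), chars.Nodup → (∀ p ∈ ps, key p ∈ chars) →
    (chars.flatMap (fun c => ps.filter (fun p => key p == c))).Perm ps := by
  intro chars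
  induction chars with
  | nil =>
      intro ps _ hall
      cases ps with
      | nil => simp
      | cons p t => exact absurd (hall p (by simp)) (by simp)
  | cons c cs ih =>
      intro ps hnd hall
      rcases List.nodup_cons.mp hnd with ⟨hc, hnds⟩
      have hsub : ∀ c' ∈ cs, ps.filter (fun p => key p == c')
          = (ps.filter (fun p => !(key p == c))).filter (fun p => key p == c') := by
        intro c' hc'
        have hne : c' ≠ c := fun h => hc (h ▸ hc')
        rw [List.filter_filter]
        refine (List.filter_congr ?_).symm
        intro x _
        by_cases hx : key x = c'
        · simp [hx, hne]
        · simp [hx]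
      have hrest : cs.flatMap (fun c' => ps.filter (fun p => key p == c'))
          = cs.flatMap (fun c' => (ps.filter (fun p => !(key p == c))).filter (fun p => key p == c')) := by
        simp only [List.flatMap]
        exact congrArg List.flatten (List.map_congr_left hsub)
      have hih := ih (ps.filter (fun p => !(key p == c))) hnds (by
        intro p hp
        rcases List.mem_filter.mp hp with ⟨hp1, hp2⟩
        have := hall p hp1
        simp at hp2
        simpa [hp2] using this)
      refine List.Perm.trans ?_ (List.filter_append_perm (fun p => key p == c) ps)
      have : (c :: cs).flatMap (fun c' => ps.filter (fun p => key p == c'))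
          = ps.filter (fun p => key p == c)
              ++ cs.flatMap (fun c' => ps.filter (fun p => key p == c')) := by simp
      rw [this, hrest]
      exact hih.append_left _

-- the enumerate list has strictly increasing indices
theorem enumerate_pairwise_fst {α : Type} (xs : List α) :
    (PySem.List.enumerate xs).Pairwise (fun p q => p.1 < q.1) := by
  have h := PySem.List.pairwise_lt_pyRange_one (0 : Int) (0 + xs.length)
  rw [← PySem.List.map_fst_enumerate xs 0] at h
  exact List.pairwise_map.mp h

-- main equality, over the character list
theorem column_order_main (cs : List Char) :
    (PySem.List.sorted2 (PySem.List.enumerate cs) (fun p => p.2) (fun p => p.1) false).map (fun p => p.1)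
      = (PySem.List.sorted
            ((PySem.List.enumerate cs).foldl
              (fun d p => d.modify p.2 [] (fun l => l ++ [p.1])) PySem.Dict.empty).keys
            (fun c => c) false).foldl
          (fun acc c =>
            acc ++ ((PySem.List.enumerate cs).foldl
              (fun d p => d.modify p.2 [] (fun l => l ++ [p.1])) PySem.Dict.empty).getD c [])
          [] := by
  have hkeys : ((PySem.List.enumerate cs).foldl
      (fun d p => d.modify p.2 [] (fun l => l ++ [p.1])) PySem.Dict.empty).keys
      = PySem.Set.ofList cs := by
    rw [PySem.Dict.keys_foldl_modify_key (PySem.List.enumerate cs) (fun p => p.2) []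
      (fun _ p => fun l => l ++ [p.1]), PySem.List.map_snd_enumerate]
    simp [PySem.Set.update, PySem.Set.ofList]
  have hgetD : ∀ c, ((PySem.List.enumerate cs).foldl
      (fun d p => d.modify p.2 [] (fun l => l ++ [p.1])) PySem.Dict.empty).getD c []
      = ((PySem.List.enumerate cs).filter (fun p => p.2 == c)).map (fun p => p.1) := by
    intro c
    have hswap : (PySem.List.enumerate cs).foldl
        (fun d p => d.modify p.2 [] (fun l => l ++ [p.1])) PySem.Dict.empty
        = ((PySem.List.enumerate cs).map (fun p => (p.2, p.1))).foldl
        (fun d p => d.modify p.1 [] (fun l => l ++ [p.2])) PySem.Dict.empty := by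
      rw [List.foldl_map]
    rw [hswap, PySem.Dict.getD_foldl_modify_append, List.filter_map]
    simp only [List.map_map]
    rfl
  have hperm : ((PySem.List.sorted (PySem.Set.ofList cs) (fun c => c) false).flatMap
      (fun c => (PySem.List.enumerate cs).filter (fun p => p.2 == c))).Perm
      (PySem.List.enumerate cs) := by
    refine flatMap_filter_perm (fun p : Int × Char => p.2) _ _ ?_ ?_
    · exact ((PySem.List.sorted_perm _ _ _).nodup_iff).mpr (PySem.Set.nodup_ofList cs)
    · intro p hp
      rw [PySem.List.mem_sorted, PySem.Set.mem_ofList]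
      have h2 := List.mem_map_of_mem (f := fun p => p.2) hp
      rw [PySem.List.map_snd_enumerate] at h2
      exact h2
  have hpair : ((PySem.List.sorted (PySem.Set.ofList cs) (fun c => c) false).flatMap
      (fun c => (PySem.List.enumerate cs).filter (fun p => p.2 == c))).Pairwise
      (fun p q => (toLex (p.2, p.1) : Lex (Char × Int)) < toLex (q.2, q.1)) := by
    rw [List.flatMap, List.pairwise_flatten]
    constructor
    · intro l hl
      rcases List.mem_map.mp hl with ⟨c, _, rfl⟩
      refine ((enumerate_pairwise_fst cs).filter _).imp_of_mem ?_
      intro a b ha hb hab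
      have ha2 : a.2 = c := by simpa using (List.mem_filter.mp ha).2
      have hb2 : b.2 = c := by simpa using (List.mem_filter.mp hb).2
      rw [Prod.Lex.lt_iff]
      right
      exact ⟨by simp [ha2, hb2], by simpa using hab⟩
    · have hS' := PySem.List.sorted_ofList_pairwise_lt cs
      rw [List.pairwise_map]
      refine hS'.imp_of_mem ?_
      intro c c' _ _ hcc x hx y hy
      have hx2 : x.2 = c := by simpa using (List.mem_filter.mp hx).2
      have hy2 : y.2 = c' := by simpa using (List.mem_filter.mp hy).2
      rw [Prod.Lex.lt_iff]
      left
      simp [hx2, hy2, hcc]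
  have hA : PySem.List.sorted2 (PySem.List.enumerate cs) (fun p => p.2) (fun p => p.1) false
      = (PySem.List.sorted (PySem.Set.ofList cs) (fun c => c) false).flatMap
        (fun c => (PySem.List.enumerate cs).filter (fun p => p.2 == c)) := by
    rw [sorted2_eq_sorted_lex]
    exact PySem.List.sorted_eq_of_perm_of_pairwise_lt _ _ _ hperm hpair
  rw [hkeys, PySem.List.foldl_append_eq_flatMap, List.nil_append,
    funext hgetD, hA, List.map_flatMap]

-- ===== VERDICT (by name: the statement is the Claim_ definition above) =====
theorem column_order_py_spec : Claim_equal_column_order_py := by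
  intro key _
  unfold Spec_column_order_py
  simp only [column_order_py, column_order_py_alt]
  exact column_order_main key.toList
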